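-- pv_equiv track=rewrite | github.com/LianPing-cyber/PromptCOS | embedding_tools/watermark_embedding.py | merge_with_at
-- ===== SOURCE A (Python) =====
-- from bisect import bisect_right
--
-- def merge_with_at(main_lis, score_lis, at_lis, n):
--     m = len(at_lis)
--     L = len(score_lis)
--     n_eff = min(n, L)
--
--     idx_small = sorted(range(L), key=lambda i: (score_lis[i], i))[:m]
--     idx_large = sorted(range(L), key=lambda i: (-score_lis[i], i))[:n_eff]
--
--     insert_points_sorted = sorted(idx_small)
--     merge_list = list(main_lis)
--     at_pos = [None] * m
--
--     for t, ins_idx in enumerate(insert_points_sorted):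
--         pos = ins_idx + t
--         merge_list.insert(pos, at_lis[t])
--         at_pos[t] = pos
--
--     cv_pos = []
--     for j in idx_large:
--         shift = bisect_right(insert_points_sorted, j)
--         cv_pos.append(j + shift)
--
--     return merge_list, at_pos, cv_pos, idx_small, idx_large
-- ===== SOURCE B (Python) =====
-- def merge_with_at(main_lis, score_lis, at_lis, n):
--     m = len(at_lis)
--     L = len(score_lis)
--     n_eff = min(n, L)
--
--     asc = sorted(zip(score_lis, range(L)))
--     idx_small = [i for _, i in asc[:m]]
--     desc = sorted(zip((-s for s in score_lis), range(L)))
--     idx_large = [i for _, i in desc[:n_eff]]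
--
--     ips = sorted(idx_small)
--     M = len(main_lis)
--     merge_list = []
--     at_pos = []
--     k = 0
--     for t, ins in enumerate(ips):
--         c = min(ins, M) - k
--         merge_list.extend(main_lis[k:k + c])
--         merge_list.append(at_lis[t])
--         at_pos.append(ins + t)
--         k += c
--     merge_list.extend(main_lis[k:])
--
--     cnt = []
--     p = 0
--     T = len(ips)
--     for j in range(L):
--         while p < T and ips[p] <= j:
--             p += 1
--         cnt.append(p)
--     cv_pos = [j + cnt[j] for j in idx_large]
--
--     return merge_list, at_pos, cv_pos, idx_small, idx_large
-- ===== Notes on version B (the rewrite author's own statement) =====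
-- stated objective: faster
-- what changed: B builds the merged list with one linear merge pass instead of A's m repeated list.insert calls, computes the insertion shifts for cv_pos with a two-pointer prefix-count array instead of per-query bisect, and selects the extreme indices by sorting (score, index) pairs directly instead of sorting indices under a key function.
-- outside the precondition, e.g. on merge_with_at([], [], [0], 0): A returns ([], [None], [], [], []), B returns ([], [], [], [], [])
import Mathlib
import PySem

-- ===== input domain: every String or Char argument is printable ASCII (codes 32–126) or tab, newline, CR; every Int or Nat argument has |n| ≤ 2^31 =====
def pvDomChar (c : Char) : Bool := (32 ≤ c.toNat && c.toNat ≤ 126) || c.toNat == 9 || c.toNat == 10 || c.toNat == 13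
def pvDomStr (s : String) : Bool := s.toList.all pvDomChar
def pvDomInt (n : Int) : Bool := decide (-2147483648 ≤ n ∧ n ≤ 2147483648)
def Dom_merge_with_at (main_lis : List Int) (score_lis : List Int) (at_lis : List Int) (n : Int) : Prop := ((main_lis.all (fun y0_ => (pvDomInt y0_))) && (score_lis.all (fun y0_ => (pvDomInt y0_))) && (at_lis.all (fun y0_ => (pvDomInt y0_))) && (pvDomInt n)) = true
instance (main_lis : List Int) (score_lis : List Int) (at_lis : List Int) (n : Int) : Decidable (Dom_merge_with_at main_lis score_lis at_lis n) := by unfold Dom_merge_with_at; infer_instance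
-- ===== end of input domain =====

-- B replaces A's m repeated list.insert calls (O(L*m) element shifting) by one linear merge
-- pass and A's per-query bisect by a two-pointer prefix-count scan; objective: faster.

-- ===== PORT A =====
-- Literal port of A.  Notes on exactness:
--  * score_lis[i] is ported as pyGetD score_lis i 0: every i comes from range(L), so the
--    index is always in range and the default is never used.
--  * at_pos = [None] * m is ported as List.replicate m 0; under Pre_ (m ≤ L) every slot is
--    overwritten before it is returned (outside Pre_ Python returns None entries, not ints).
--  * bisect.bisect_right is PySem.List.bisectRight; sorted(xs) is sorted with identity key;
--    the tuple keys of sorted(..., key=lambda i: (..., i)) use PySem.List.sorted2.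
def merge_with_at (main_lis : List Int) (score_lis : List Int) (at_lis : List Int) (n : Int) : List Int × List Int × List Int × List Int × List Int :=
  let m : Nat := at_lis.length
  let L : Nat := score_lis.length
  let n_eff : Int := min n (L : Int)
  let idx_small := PySem.List.slice (PySem.List.sorted2 (PySem.List.pyRange 0 (L : Int) 1) (fun i => PySem.List.pyGetD score_lis i 0) (fun i => i)) none (some (m : Int))
  let idx_large := PySem.List.slice (PySem.List.sorted2 (PySem.List.pyRange 0 (L : Int) 1) (fun i => -(PySem.List.pyGetD score_lis i 0)) (fun i => i)) none (some n_eff)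
  let insert_points_sorted := PySem.List.sorted idx_small (fun x => x)
  -- the loop 'for t, ins_idx in enumerate(insert_points_sorted)' mutating (merge_list, at_pos)
  let st := (PySem.List.enumerate insert_points_sorted 0).foldl
    (fun (st : List Int × List Int) ti =>
      (PySem.List.insert st.1 (ti.2 + ti.1) (PySem.List.pyGetD at_lis ti.1 0),
       PySem.List.pySetD st.2 ti.1 (ti.2 + ti.1)))
    (main_lis, List.replicate m (0 : Int))
  let cv_pos := idx_large.foldl (fun acc j => acc ++ [j + (PySem.List.bisectRight insert_points_sorted j : Int)]) []
  (st.1, st.2, cv_pos, idx_small, idx_large)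

-- ===== PORT B =====
-- Port of Source B.  mergeLoopB is B's single merge pass: 'main_lis[k:k+c]' is (main.drop k).take c
-- (= PySem.List.slice main (k) (k+c) by slice_natCast_add); the appended accumulators become
-- the returned (merge_list, at_pos) pair built front-to-back.
def mergeLoopB (atl main : List Int) : List (Int × Int) → Nat → List Int × List Int
  | [], k => (main.drop k, [])
  | (t, ins) :: ps, k =>
    let c := min ins.toNat main.length - k
    let r := mergeLoopB atl main ps (k + c)
    ((main.drop k).take c ++ PySem.List.pyGetD atl t 0 :: r.1, (ins + t) :: r.2)

-- B's inner 'while p < T and ips[p] <= j: p += 1'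
def advanceB (ips : List Int) (j : Int) (p : Nat) : Nat :=
  if h : p < ips.length then
    if ips[p] ≤ j then advanceB ips j (p + 1) else p
  else p
termination_by ips.length - p

def merge_with_at_alt (main_lis : List Int) (score_lis : List Int) (at_lis : List Int) (n : Int) : List Int × List Int × List Int × List Int × List Int :=
  let m : Nat := at_lis.length
  let L : Nat := score_lis.length
  let n_eff : Int := min n (L : Int)
  let asc := PySem.List.sorted2 (score_lis.zip (PySem.List.pyRange 0 (L : Int) 1)) (fun p => p.1) (fun p => p.2)
  let idx_small := (PySem.List.slice asc none (some (m : Int))).map (fun p => p.2)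
  let desc := PySem.List.sorted2 ((score_lis.map (fun s => -s)).zip (PySem.List.pyRange 0 (L : Int) 1)) (fun p => p.1) (fun p => p.2)
  let idx_large := (PySem.List.slice desc none (some n_eff)).map (fun p => p.2)
  let ips := PySem.List.sorted idx_small (fun x => x)
  let r := mergeLoopB at_lis main_lis (PySem.List.enumerate ips 0) 0
  let cnt := ((PySem.List.pyRange 0 (L : Int) 1).foldl
      (fun (st : Nat × List Int) j => (advanceB ips j st.1, st.2 ++ [(advanceB ips j st.1 : Int)])) (0, [])).2
  let cv_pos := idx_large.map (fun j => j + PySem.List.pyGetD cnt j 0)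
  (r.1, r.2, cv_pos, idx_small, idx_large)

-- ===== PRECONDITION & SPEC =====
-- Pre_ excludes inputs with len(at_lis) > len(score_lis): there A returns None placeholders
-- inside at_pos (not an int value), since fewer than m insert points exist.
def Pre_merge_with_at (main_lis : List Int) (score_lis : List Int) (at_lis : List Int) (n : Int) : Prop :=
  at_lis.length ≤ score_lis.length
instance (main_lis : List Int) (score_lis : List Int) (at_lis : List Int) (n : Int) : Decidable (Pre_merge_with_at main_lis score_lis at_lis n) := by unfold Pre_merge_with_at; infer_instance

def pvWitness_merge_with_at : List Int × List Int × List Int × Int := ([10, 20], [3, 1, 2], [99], 2)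

def Spec_merge_with_at (main_lis : List Int) (score_lis : List Int) (at_lis : List Int) (n : Int) (out : List Int × List Int × List Int × List Int × List Int) : Prop := out = merge_with_at_alt main_lis score_lis at_lis n
instance (main_lis : List Int) (score_lis : List Int) (at_lis : List Int) (n : Int) (out : List Int × List Int × List Int × List Int × List Int) : Decidable (Spec_merge_with_at main_lis score_lis at_lis n out) := by unfold Spec_merge_with_at; infer_instance

-- ===== CLAIM (what is proved, stated in full; the proofs are below) =====
def Claim_equal_merge_with_at : Prop := ∀ (main_lis : List Int) (score_lis : List Int) (at_lis : List Int) (n : Int), Dom_merge_with_at main_lis score_lis at_lis n → Pre_merge_with_at main_lis score_lis at_lis n → Spec_merge_with_at main_lis score_lis at_lis n (merge_with_at main_lis score_lis at_lis n)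

-- ===== LEMMAS AND PROOFS =====

theorem insert_takeDrop (xs : List Int) (i : Int) (v : Int) (hi : 0 ≤ i) :
    PySem.List.insert xs i v = xs.take i.toNat ++ v :: xs.drop i.toNat := by
  by_cases h : i.toNat ≤ xs.length
  · have e : i = ((i.toNat : Nat) : Int) := (Int.toNat_of_nonneg hi).symm
    rw [e, PySem.List.insert_natCast _ _ _ h, Int.toNat_natCast]
  · push Not at h
    simp only [PySem.List.insert, PySem.List.sliceIndices]
    have h1 : ¬ (1:Int) < 0 := by omega
    have h2 : ¬ i < 0 := by omega
    simp only [if_neg h1, if_neg h2]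
    have e : (min i (xs.length : Int)).toNat = xs.length := by omega
    rw [e]
    rw [List.take_of_length_le (by omega), List.take_of_length_le (by omega),
        List.drop_of_length_le (by omega), List.drop_of_length_le (by omega)]

theorem sorted2_eq_sorted_toLex {α : Type} (xs : List α) (k1 k2 : α → Int) :
    PySem.List.sorted2 xs k1 k2 = PySem.List.sorted xs (fun a => toLex (k1 a, k2 a)) := by
  have hf : (fun (a b : α) => decide (k1 a < k1 b) || (!decide (k1 b < k1 a) && decide (k2 a < k2 b)))
      = fun a b => decide (toLex (k1 a, k2 a) < toLex (k1 b, k2 b)) := by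
    funext a b
    by_cases h1 : k1 a < k1 b <;> by_cases h2 : k1 b < k1 a <;> by_cases h3 : k2 a < k2 b <;>
      simp [h1, h2, h3, Prod.Lex.lt_iff] <;> omega
  rw [PySem.List.sorted_eq_foldl_insertBy]
  unfold PySem.List.sorted2
  simp only [if_neg (by decide : ¬ (false = true))]
  rw [hf]

theorem zip_range_eq_map (ws : List Int) :
    ws.zip (PySem.List.pyRange 0 (ws.length : Int) 1)
      = (PySem.List.pyRange 0 (ws.length : Int) 1).map (fun i => (PySem.List.pyGetD ws i 0, i)) := by
  have hlen : (PySem.List.pyRange 0 (ws.length : Int) 1).length = ws.length := by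
    rw [PySem.List.length_pyRange_one]; omega
  apply List.ext_getElem
  · simp [hlen]
  · intro i h1 h2
    have hi : i < ws.length := by simpa [hlen] using h2
    have hr : (PySem.List.pyRange 0 (ws.length : Int) 1)[i]'(by omega) = (i : Int) := by
      rw [PySem.List.getElem_pyRange_one]; omega
    simp only [List.getElem_zip, List.getElem_map, hr]
    congr 1
    rw [PySem.List.pyGetD_natCast, List.getD_eq_getElem _ _ hi]

theorem sorted_pairs_eq_map (ws : List Int) (k1 : Int → Int)
    (hk : ∀ i : Int, 0 ≤ i → i < (ws.length : Int) → k1 i = PySem.List.pyGetD ws i 0) :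
    PySem.List.sorted2 (ws.zip (PySem.List.pyRange 0 (ws.length : Int) 1)) (fun p => p.1) (fun p => p.2)
      = (PySem.List.sorted2 (PySem.List.pyRange 0 (ws.length : Int) 1) k1 (fun i => i)).map (fun i => (k1 i, i)) := by
  rw [sorted2_eq_sorted_toLex, sorted2_eq_sorted_toLex]
  set R := PySem.List.pyRange 0 (ws.length : Int) 1 with hR
  set A' := PySem.List.sorted R (fun i => toLex (k1 i, i)) with hA
  have hperm : A'.Perm R := PySem.List.sorted_perm R _ false
  have hnodup : A'.Nodup := (hperm.nodup_iff).mpr (PySem.List.nodup_pyRange_one 0 _)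
  have hple : A'.Pairwise (fun a b => (toLex (k1 a, a) : Lex (Int × Int)) ≤ toLex (k1 b, b)) :=
    PySem.List.sorted_pairwise R _
  have hplt : A'.Pairwise (fun a b => (toLex (k1 a, a) : Lex (Int × Int)) < toLex (k1 b, b)) := by
    refine (hple.and hnodup).imp ?_
    rintro a b ⟨hle, hne⟩
    refine lt_of_le_of_ne hle (fun hEq => hne ?_)
    have := congrArg (fun p => (ofLex p).2) hEq
    simpa using this
  apply PySem.List.sorted_eq_of_perm_of_pairwise_lt
  · have hmapeq : R.map (fun i => (k1 i, i)) = R.map (fun i => (PySem.List.pyGetD ws i 0, i)) := by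
      apply List.map_congr_left
      intro i hi
      have := PySem.List.mem_pyRange_one.mp (hR ▸ hi)
      rw [hk i this.1 this.2]
    calc (A'.map (fun i => (k1 i, i))).Perm (R.map (fun i => (k1 i, i))) := hperm.map _
      _ = ws.zip R := by rw [hmapeq, hR, ← zip_range_eq_map]
  · rw [List.pairwise_map]
    exact hplt

theorem slice_map_none {α β : Type} (f : α → β) (xs : List α) (b? : Option Int) :
    PySem.List.slice (xs.map f) none b? = (PySem.List.slice xs none b?).map f := by
  unfold PySem.List.slice
  cases b? <;> simp [List.map_take]

theorem inserts_eq_mergeLoop (atl main : List Int) :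
    ∀ (ips : List Int) (t0 k : Nat) (pre : List Int),
      ips.Pairwise (· ≤ ·) → (∀ x ∈ ips, (k : Int) ≤ x) → k ≤ main.length →
      pre.length = k + t0 →
      (PySem.List.enumerate ips (t0 : Int)).foldl
          (fun ml ti => PySem.List.insert ml (ti.2 + ti.1) (PySem.List.pyGetD atl ti.1 0))
          (pre ++ main.drop k)
        = pre ++ (mergeLoopB atl main (PySem.List.enumerate ips (t0 : Int)) k).1 := by
  intro ips
  induction ips with
  | nil => intro t0 k pre _ _ _ _; simp [PySem.List.enumerate, mergeLoopB]
  | cons ins ps ih =>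
    intro t0 k pre hpw hk hkM hpre
    have h0 : (0:Int) ≤ ins := le_trans (by omega) (hk ins (by simp))
    have hki : k ≤ ins.toNat := by
      have := hk ins (by simp); omega
    rw [PySem.List.enumerate_cons]
    simp only [List.foldl_cons]
    -- the first insert
    have hpos : (0:Int) ≤ ins + (t0 : Int) := by omega
    rw [insert_takeDrop _ _ _ hpos]
    have htn : (ins + (t0:Int)).toNat = ins.toNat + t0 := by omega
    rw [htn]
    set c : Nat := min ins.toNat main.length - k with hc
    set rest : List Int := main.drop k with hrest
    have hrestlen : rest.length = main.length - k := by simp [hrest]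
    have hcle : c ≤ rest.length := by omega
    have htake : (pre ++ rest).take (ins.toNat + t0) = pre ++ rest.take c := by
      rw [List.take_append, List.take_of_length_le (by omega), hpre]
      congr 1
      rcases le_or_gt ins.toNat main.length with hle | hgt
      · have : ins.toNat + t0 - (k + t0) = c := by omega
        rw [this]
      · have h1 : ins.toNat + t0 - (k + t0) = ins.toNat - k := by omega
        rw [h1, List.take_of_length_le (by omega), List.take_of_length_le (by omega)]
    have hdrop : (pre ++ rest).drop (ins.toNat + t0) = rest.drop c := by
      rw [List.drop_append, List.drop_of_length_le (by omega), hpre]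
      simp only [List.nil_append]
      rcases le_or_gt ins.toNat main.length with hle | hgt
      · have : ins.toNat + t0 - (k + t0) = c := by omega
        rw [this]
      · have h1 : ins.toNat + t0 - (k + t0) = ins.toNat - k := by omega
        rw [h1, List.drop_of_length_le (by omega), List.drop_of_length_le (by omega)]
    rw [htake, hdrop]
    -- regroup and apply IH
    have hdd : rest.drop c = main.drop (k + c) := by
      rw [hrest, List.drop_drop]
    have hregroup : pre ++ rest.take c ++ PySem.List.pyGetD atl (t0:Int) 0 :: rest.drop c
        = (pre ++ rest.take c ++ [PySem.List.pyGetD atl (t0:Int) 0]) ++ main.drop (k + c) := by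
      simp [List.append_assoc, hdd]
    rw [hregroup]
    have hps : ∀ x ∈ ps, ((k + c : Nat) : Int) ≤ x := by
      intro x hx
      have hix : ins ≤ x := (List.pairwise_cons.mp hpw).1 x hx
      have : k + c = min ins.toNat main.length := by omega
      rw [this]
      omega
    have ht0 : ((t0:Int) + 1) = (((t0 + 1 : Nat)) : Int) := by push_cast; ring
    rw [ht0]
    rw [ih (t0 + 1) (k + c) (pre ++ rest.take c ++ [PySem.List.pyGetD atl (t0:Int) 0])
        (List.pairwise_cons.mp hpw).2 hps (by omega)
        (by simp [hpre, List.length_take]; omega)]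
    -- fold back mergeLoopB
    show _ = pre ++ (mergeLoopB atl main ((( t0:Int), ins) :: PySem.List.enumerate ps ((t0:Int)+1)) k).1
    rw [mergeLoopB]
    simp only [← hc, ← hrest, ht0]
    simp [List.append_assoc]

theorem mergeLoop_snd (atl main : List Int) :
    ∀ (ips : List Int) (t0 : Int) (k : Nat),
      (mergeLoopB atl main (PySem.List.enumerate ips t0) k).2
        = (PySem.List.enumerate ips t0).map (fun ti => ti.2 + ti.1) := by
  intro ips
  induction ips with
  | nil => intro t0 k; simp [PySem.List.enumerate, mergeLoopB]
  | cons ins ps ih =>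
    intro t0 k
    rw [PySem.List.enumerate_cons, mergeLoopB]
    simp only [List.map_cons]
    rw [ih]

theorem setfold_eq_map (ips : List Int) :
    ∀ (t0 : Nat) (init : List Int), t0 + ips.length ≤ init.length →
      (PySem.List.enumerate ips (t0 : Int)).foldl
          (fun ap ti => PySem.List.pySetD ap ti.1 (ti.2 + ti.1)) init
        = init.take t0 ++ (PySem.List.enumerate ips (t0 : Int)).map (fun ti => ti.2 + ti.1)
            ++ init.drop (t0 + ips.length) := by
  induction ips with
  | nil =>
    intro t0 init h
    simp [PySem.List.enumerate]
  | cons ins ps ih =>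
    intro t0 init h
    simp only [List.length_cons] at h
    rw [PySem.List.enumerate_cons]
    simp only [List.foldl_cons, List.map_cons]
    rw [PySem.List.pySetD_natCast]
    have ht0 : ((t0:Int) + 1) = (((t0 + 1 : Nat)) : Int) := by push_cast; ring
    rw [ht0, ih (t0+1) (init.set t0 (ins + t0)) (by simp; omega)]
    have hset : init.set t0 (ins + (t0:Int)) = init.take t0 ++ (ins + (t0:Int)) :: init.drop (t0 + 1) := by
      rw [List.set_eq_take_append_cons_drop, if_pos (by omega)]
    rw [hset]
    have hl : (init.take t0).length = t0 := by simp; omega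
    rw [List.take_append, List.take_of_length_le (l := init.take t0) (i := t0+1) (by rw [hl]; omega), hl]
    have e1 : t0 + 1 - t0 = 1 := by omega
    rw [e1]
    rw [List.drop_append, List.drop_of_length_le (l := init.take t0) (i := t0+1+ps.length) (by rw [hl]; omega), hl]
    have e2 : t0 + 1 + ps.length - t0 = 1 + ps.length := by omega
    rw [e2]
    have e3 : 1 + ps.length = ps.length + 1 := by omega
    rw [e3]
    simp only [List.take_succ_cons, List.take_zero, List.drop_succ_cons, List.drop_drop,
      List.nil_append, List.length_cons]
    have e4 : t0 + 1 + ps.length = t0 + (ps.length + 1) := by omega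
    rw [e4]
    simp [List.append_assoc]

theorem bisectRight_eq_countP (xs : List Int) (x : Int) (h : xs.Pairwise (· ≤ ·)) :
    PySem.List.bisectRight xs x = xs.countP (fun v => decide (v ≤ x)) := by
  obtain ⟨hb, hlt, hge⟩ := PySem.List.bisectRight_spec xs x h
  set b := PySem.List.bisectRight xs x with hbdef
  have hsplit : xs = xs.take b ++ xs.drop b := (List.take_append_drop b xs).symm
  rw [hsplit, List.countP_append]
  have h1 : (xs.take b).countP (fun v => decide (v ≤ x)) = b := by
    have : (xs.take b).countP (fun v => decide (v ≤ x)) = (xs.take b).length := by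
      rw [List.countP_eq_length]
      intro a ha
      obtain ⟨i, hi, hai⟩ := List.mem_iff_getElem.mp ha
      have hib : i < b := by simp [List.length_take] at hi; omega
      have : (xs.take b)[i] = xs[i]'(by omega) := List.getElem_take
      simp only [decide_eq_true_eq]
      rw [← hai, this]
      exact hlt i (by omega) hib
    rw [this, List.length_take]
    omega
  have h2 : (xs.drop b).countP (fun v => decide (v ≤ x)) = 0 := by
    rw [List.countP_eq_zero]
    intro a ha
    obtain ⟨i, hi, hai⟩ := List.mem_iff_getElem.mp ha
    have hlen : (xs.drop b).length = xs.length - b := by simp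
    have : (xs.drop b)[i] = xs[b + i]'(by omega) := List.getElem_drop ..
    simp only [decide_eq_true_eq]
    rw [← hai, this]
    simp only [not_le]
    exact hge (b + i) (by omega) (by omega)
  omega

theorem advanceB_eq_countP (ips : List Int) (j : Int) (h : ips.Pairwise (· ≤ ·)) :
    ∀ p : Nat, p ≤ ips.countP (fun v => decide (v ≤ j)) →
      advanceB ips j p = ips.countP (fun v => decide (v ≤ j)) := by
  intro p
  induction p using advanceB.induct ips j with
  | case1 p hp hle ih =>
    intro hple
    rw [advanceB, dif_pos hp, if_pos hle]
    apply ih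
    -- p+1 ≤ countP: the first p+1 elements all satisfy
    have hall : ∀ a ∈ ips.take (p+1), (fun v => decide (v ≤ j)) a = true := by
      intro a ha
      obtain ⟨i, hi, hai⟩ := List.mem_iff_getElem.mp ha
      have hib : i < p + 1 := by simp [List.length_take] at hi; omega
      have hil : i < ips.length := by simp [List.length_take] at hi; omega
      have hgi : (ips.take (p+1))[i] = ips[i]'hil := List.getElem_take
      have hle2 : ips[i]'hil ≤ ips[p] := by
        rcases Nat.lt_or_ge i p with hlt2 | hge2
        · exact (List.pairwise_iff_getElem.mp h) i p hil hp hlt2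
        · have : i = p := by omega
          subst this; rfl
      simp only [decide_eq_true_eq]
      rw [← hai, hgi]
      exact le_trans hle2 hle
    have : (ips.take (p+1)).countP (fun v => decide (v ≤ j)) = p + 1 := by
      rw [List.countP_eq_length.mpr hall, List.length_take]; omega
    calc p + 1 = (ips.take (p+1)).countP (fun v => decide (v ≤ j)) := this.symm
      _ ≤ ips.countP (fun v => decide (v ≤ j)) := by
          conv_rhs => rw [← List.take_append_drop (p+1) ips]
          rw [List.countP_append]; omega
  | case2 p hp hgt =>
    intro hple
    rw [advanceB, dif_pos hp, if_neg hgt]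
    -- all elements from p on are > j
    have h2 : (ips.drop p).countP (fun v => decide (v ≤ j)) = 0 := by
      rw [List.countP_eq_zero]
      intro a ha
      obtain ⟨i, hi, hai⟩ := List.mem_iff_getElem.mp ha
      have hil : p + i < ips.length := by simp [List.length_drop] at hi; omega
      have : (ips.drop p)[i] = ips[p + i]'hil := List.getElem_drop ..
      have hpi : ips[p] ≤ ips[p+i]'hil := by
        rcases Nat.eq_or_lt_of_le (Nat.le_add_right p i) with he | hlt2
        · simp [← he]
        · exact (List.pairwise_iff_getElem.mp h) p (p+i) hp hil hlt2
      intro hcon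
      simp only [decide_eq_true_eq] at hcon
      rw [← hai, this] at hcon
      exact hgt (le_trans hpi hcon)
    have : ips.countP (fun v => decide (v ≤ j)) ≤ p := by
      conv_lhs => rw [← List.take_append_drop p ips]
      rw [List.countP_append, h2]
      have := List.countP_le_length (l := ips.take p) (p := fun v => decide (v ≤ j))
      simp at this
      omega
    omega
  | case3 p hp =>
    intro hple
    rw [advanceB, dif_neg hp]
    have := List.countP_le_length (l := ips) (p := fun v => decide (v ≤ j))
    omega

theorem cntfold_eq_map (ips : List Int) (h : ips.Pairwise (· ≤ ·)) :
    ∀ (js : List Int) (p0 : Nat) (acc : List Int),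
      js.Pairwise (· ≤ ·) →
      (∀ j ∈ js, p0 ≤ ips.countP (fun v => decide (v ≤ j))) →
      (js.foldl (fun (st : Nat × List Int) j => (advanceB ips j st.1, st.2 ++ [(advanceB ips j st.1 : Int)])) (p0, acc)).2
        = acc ++ js.map (fun j => ((ips.countP (fun v => decide (v ≤ j)) : Nat) : Int)) := by
  intro js
  induction js with
  | nil => intro p0 acc _ _; simp
  | cons j js ih =>
    intro p0 acc hpw hp0
    simp only [List.foldl_cons, List.map_cons]
    rw [advanceB_eq_countP ips j h p0 (hp0 j (by simp))]
    have harg : ∀ j' ∈ js, ips.countP (fun v => decide (v ≤ j)) ≤ ips.countP (fun v => decide (v ≤ j')) := by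
      intro j' hj'
      have hjj' : j ≤ j' := (List.pairwise_cons.mp hpw).1 j' hj'
      exact List.countP_mono_left (fun a _ ha => by simp at ha ⊢; omega)
    rw [ih _ _ (List.pairwise_cons.mp hpw).2 harg]
    simp

theorem idx_small_eq (score_lis : List Int) (q : Option Int) :
    (PySem.List.slice (PySem.List.sorted2 (score_lis.zip (PySem.List.pyRange 0 (score_lis.length : Int) 1)) (fun p => p.1) (fun p => p.2)) none q).map (fun p => p.2)
      = PySem.List.slice (PySem.List.sorted2 (PySem.List.pyRange 0 (score_lis.length : Int) 1) (fun i => PySem.List.pyGetD score_lis i 0) (fun i => i)) none q := by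
  rw [sorted_pairs_eq_map score_lis _ (fun _ _ _ => rfl), slice_map_none, List.map_map]
  simp [Function.comp_def]

theorem idx_large_eq (score_lis : List Int) (q : Option Int) :
    (PySem.List.slice (PySem.List.sorted2 ((score_lis.map (fun s => -s)).zip (PySem.List.pyRange 0 (score_lis.length : Int) 1)) (fun p => p.1) (fun p => p.2)) none q).map (fun p => p.2)
      = PySem.List.slice (PySem.List.sorted2 (PySem.List.pyRange 0 (score_lis.length : Int) 1) (fun i => -(PySem.List.pyGetD score_lis i 0)) (fun i => i)) none q := by
  have hlen : (score_lis.map (fun s => -s)).length = score_lis.length := by simp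
  have hk : ∀ i : Int, 0 ≤ i → i < ((score_lis.map (fun s => -s)).length : Int) →
      -(PySem.List.pyGetD score_lis i 0) = PySem.List.pyGetD (score_lis.map (fun s => -s)) i 0 := by
    intro i _ _
    have := PySem.List.pyGetD_map (fun s : Int => -s) score_lis i 0
    simpa using this.symm
  rw [← hlen]
  rw [sorted_pairs_eq_map (score_lis.map (fun s => -s)) _ hk, slice_map_none, List.map_map]
  simp [Function.comp_def]

theorem merge_fst_eq (at_lis main_lis ips : List Int)
    (hips : ips.Pairwise (· ≤ ·)) (hpos : ∀ x ∈ ips, 0 ≤ x) :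
    (PySem.List.enumerate ips 0).foldl
        (fun ml ti => PySem.List.insert ml (ti.2 + ti.1) (PySem.List.pyGetD at_lis ti.1 0)) main_lis
      = (mergeLoopB at_lis main_lis (PySem.List.enumerate ips 0) 0).1 := by
  have := inserts_eq_mergeLoop at_lis main_lis ips 0 0 []
    hips (by intro x hx; simpa using hpos x hx) (Nat.zero_le _) rfl
  simpa using this

theorem at_pos_eq (at_lis main_lis ips : List Int) (m : Nat) (hlen : ips.length = m) :
    (PySem.List.enumerate ips 0).foldl
        (fun ap ti => PySem.List.pySetD ap ti.1 (ti.2 + ti.1)) (List.replicate m (0 : Int))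
      = (mergeLoopB at_lis main_lis (PySem.List.enumerate ips 0) 0).2 := by
  rw [mergeLoop_snd]
  have := setfold_eq_map ips 0 (List.replicate m (0:Int)) (by simp [hlen])
  simpa [hlen] using this

theorem cv_eq (ips idx : List Int) (L : Nat)
    (hips : ips.Pairwise (· ≤ ·))
    (hidx : ∀ j ∈ idx, 0 ≤ j ∧ j < (L : Int)) :
    idx.foldl (fun acc j => acc ++ [j + (PySem.List.bisectRight ips j : Int)]) []
      = idx.map (fun j => j + PySem.List.pyGetD
          (((PySem.List.pyRange 0 (L : Int) 1).foldl
            (fun (st : Nat × List Int) j => (advanceB ips j st.1, st.2 ++ [(advanceB ips j st.1 : Int)])) (0, [])).2) j 0) := by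
  rw [PySem.List.foldl_append_singleton_eq_map]
  rw [cntfold_eq_map ips hips (PySem.List.pyRange 0 (L : Int) 1) 0 []
    ((PySem.List.pairwise_lt_pyRange_one 0 _).imp le_of_lt) (fun j _ => Nat.zero_le _)]
  simp only [List.nil_append]
  apply List.map_congr_left
  intro j hj
  rw [bisectRight_eq_countP ips j hips,
      PySem.List.pyGetD_map_pyRange_of_nonneg _ _ _ _ (hidx j hj).1 (hidx j hj).2]

-- ===== VERDICT (by name: the statement is the Claim_ definition above) =====
theorem merge_with_at_spec : Claim_equal_merge_with_at := by
  intro main_lis score_lis at_lis n _hDom hPre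
  have hPre' : at_lis.length ≤ score_lis.length := hPre
  unfold Spec_merge_with_at
  simp only [merge_with_at, merge_with_at_alt]
  rw [idx_small_eq, idx_large_eq]
  set S := PySem.List.slice (PySem.List.sorted2 (PySem.List.pyRange 0 (score_lis.length : Int) 1) (fun i => PySem.List.pyGetD score_lis i 0) (fun i => i)) none (some (at_lis.length : Int)) with hS
  set G := PySem.List.slice (PySem.List.sorted2 (PySem.List.pyRange 0 (score_lis.length : Int) 1) (fun i => -(PySem.List.pyGetD score_lis i 0)) (fun i => i)) none (some (min n (score_lis.length : Int))) with hG
  have hmemS : ∀ x ∈ S, 0 ≤ x ∧ x < (score_lis.length : Int) := by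
    intro x hx
    have h1 := PySem.List.mem_of_mem_slice _ _ _ (hS ▸ hx)
    have h2 := ((PySem.List.sorted2_perm _ _ _ _).mem_iff).mp h1
    simpa using PySem.List.mem_pyRange_one.mp h2
  have hmemG : ∀ j ∈ G, 0 ≤ j ∧ j < (score_lis.length : Int) := by
    intro j hj
    have h1 := PySem.List.mem_of_mem_slice _ _ _ (hG ▸ hj)
    have h2 := ((PySem.List.sorted2_perm _ _ _ _).mem_iff).mp h1
    simpa using PySem.List.mem_pyRange_one.mp h2
  have hips : (PySem.List.sorted S (fun x => x)).Pairwise (· ≤ ·) :=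
    PySem.List.sorted_pairwise S (fun x => x)
  have hipspos : ∀ x ∈ PySem.List.sorted S (fun x => x), 0 ≤ x := by
    intro x hx
    exact (hmemS x ((PySem.List.mem_sorted _ _ _ _).mp hx)).1
  have hipsmem : ∀ j ∈ PySem.List.sorted S (fun x => x), 0 ≤ j ∧ j < (score_lis.length : Int) := by
    intro x hx
    exact hmemS x ((PySem.List.mem_sorted _ _ _ _).mp hx)
  have hSlen : S.length = at_lis.length := by
    rw [hS, PySem.List.slice_to_natCast, List.length_take,
        (PySem.List.sorted2_perm _ _ _ _).length_eq, PySem.List.length_pyRange_one]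
    omega
  have hipslen : (PySem.List.sorted S (fun x => x)).length = at_lis.length := by
    rw [PySem.List.length_sorted, hSlen]
  rw [PySem.List.foldl_prod_mk
        (fun a (ti : Int × Int) => PySem.List.insert a (ti.2 + ti.1) (PySem.List.pyGetD at_lis ti.1 0))
        (fun a (ti : Int × Int) => PySem.List.pySetD a ti.1 (ti.2 + ti.1))
        (PySem.List.enumerate (PySem.List.sorted S (fun x => x)) 0) main_lis (List.replicate at_lis.length (0:Int))]
  rw [merge_fst_eq at_lis main_lis _ hips hipspos,
      at_pos_eq at_lis main_lis _ at_lis.length hipslen,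
      cv_eq _ G score_lis.length hips hmemG]
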